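-- pv_equiv track=rewrite | github.com/InvGate/django-ipcharfield | ipcharfield/utils.py | curate_chunks
-- ===== SOURCE A (Python) =====
-- def curate_chunks(chunks):
--     """
--     :param chunks: array of chunks between : delimiter of a ipv6
--
--     In the very specific case of ipv6 one can have the :: occurrence which means 0000 chunks altogether.
--     After the operation, the chunks with the form ['fff3', 'db03', '', '4']
--                          will result in ['fff3', 'db03', '0000', '0000', '0000', '0000', '0000', '4']
--     """
--     new_chunks = []
--     missing_chunks = 9 - len(chunks)
--     for chunk in chunks:
--         if chunk != '':
--             new_chunks.append(chunk)
--         else: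
--             for i in range(missing_chunks):
--                 new_chunks.append('0000')
--             missing_chunks = 0
--     return new_chunks
-- ===== SOURCE B (Python) =====
-- def curate_chunks(chunks):
--     if '' not in chunks:
--         return list(chunks)
--     i = list(chunks).index('')
--     return list(chunks[:i]) + ['0000'] * (9 - len(chunks)) + [c for c in chunks[i + 1:] if c != '']
-- ===== Notes on version B (the rewrite author's own statement) =====
-- stated objective: simpler
-- what changed: Replaces the stateful single-pass toggle (missing_chunks counter reset to 0 after the first empty) with an index-then-splice decomposition: find the first empty chunk, splice the '0000' fillers there, and filter later empties out of the tail.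
import Mathlib
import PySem

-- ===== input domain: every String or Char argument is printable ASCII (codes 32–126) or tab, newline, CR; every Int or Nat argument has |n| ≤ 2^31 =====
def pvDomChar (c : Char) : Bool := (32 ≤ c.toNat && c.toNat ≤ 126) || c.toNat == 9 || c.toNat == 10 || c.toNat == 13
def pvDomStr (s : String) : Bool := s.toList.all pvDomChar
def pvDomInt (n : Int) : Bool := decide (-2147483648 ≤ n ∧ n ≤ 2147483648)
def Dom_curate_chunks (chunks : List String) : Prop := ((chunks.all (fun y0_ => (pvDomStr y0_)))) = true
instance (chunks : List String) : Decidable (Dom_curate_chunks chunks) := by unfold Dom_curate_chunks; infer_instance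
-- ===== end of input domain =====

-- B replaces A's stateful counter-toggle pass with an index-then-splice decomposition (objective: simpler).


-- ===== PORT A =====
-- the loop body: append the chunk, or (at an empty chunk) append '0000' for i in range(missing_chunks)
-- ('for i in range(m): append "0000"' appends exactly max(m,0) = m.toNat copies) and set missing_chunks := 0
def curateStepA (st : List String × Int) (chunk : String) : List String × Int :=
  if chunk ≠ "" then (st.1 ++ [chunk], st.2)
  else (st.1 ++ List.replicate st.2.toNat "0000", (0 : Int))

def curate_chunks (chunks : List String) : List String :=
  (chunks.foldl curateStepA ([], 9 - (chunks.length : Int))).1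

-- ===== PORT B =====
def curate_chunks_alt (chunks : List String) : List String :=
  match PySem.List.index? chunks "" with
  | none => chunks      -- '' not in chunks
  | some i =>
      chunks.take i ++ List.replicate ((9 : Int) - (chunks.length : Int)).toNat "0000"
        ++ (chunks.drop (i + 1)).filter (fun c => c ≠ "")

-- ===== PRECONDITION & SPEC =====
def Spec_curate_chunks (chunks : List String) (out : List String) : Prop := out = curate_chunks_alt chunks
instance (chunks : List String) (out : List String) : Decidable (Spec_curate_chunks chunks out) := by unfold Spec_curate_chunks; infer_instance

-- ===== CLAIM (what is proved, stated in full; the proofs are below) =====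
def Claim_equal_curate_chunks : Prop := ∀ (chunks : List String), Dom_curate_chunks chunks → Spec_curate_chunks chunks (curate_chunks chunks)

-- ===== LEMMAS AND PROOFS =====

-- after the first empty chunk, missing_chunks is 0: remaining chunks are kept iff non-empty
theorem curate_foldl_zero (l : List String) (acc : List String) :
    (l.foldl curateStepA (acc, (0 : Int))).1 = acc ++ l.filter (fun c => c ≠ "") := by
  induction l generalizing acc with
  | nil => simp
  | cons c t ih =>
    by_cases hc : c = ""
    · subst hc
      simp [curateStepA, ih]
    · simp [curateStepA, hc, ih]

theorem curate_foldl_char (l : List String) (acc : List String) (m : Int) :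
    (l.foldl curateStepA (acc, m)).1 =
      match PySem.List.index? l "" with
      | none => acc ++ l
      | some i => acc ++ l.take i ++ List.replicate m.toNat "0000"
          ++ (l.drop (i + 1)).filter (fun c => c ≠ "") := by
  induction l generalizing acc with
  | nil => simp [PySem.List.index?]
  | cons c t ih =>
    by_cases hc : c = ""
    · subst hc
      rw [PySem.List.index?_cons_self]
      have hstep : curateStepA (acc, m) "" = (acc ++ List.replicate m.toNat "0000", 0) := by
        simp [curateStepA]
      rw [List.foldl_cons, hstep, curate_foldl_zero]
      simp
    · rw [PySem.List.index?_cons_of_ne t hc]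
      have hstep : curateStepA (acc, m) c = (acc ++ [c], m) := by
        simp [curateStepA, hc]
      rw [List.foldl_cons, hstep, ih]
      cases h : PySem.List.index? t "" with
      | none => simp
      | some i => simp [List.take_succ_cons, List.drop_succ_cons]

-- ===== VERDICT (by name: the statement is the Claim_ definition above) =====
theorem curate_chunks_spec : Claim_equal_curate_chunks := by
  intro chunks _
  unfold Spec_curate_chunks curate_chunks curate_chunks_alt
  rw [curate_foldl_char]
  cases h : PySem.List.index? chunks "" with
  | none => simp
  | some i => simp
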